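-- pv_equiv track=rewrite | github.com/masdevid/smartcash | dataset/utils/file_mapping_utils.py | select_prioritized_files_for_class
-- ===== SOURCE A (Python) =====
-- from typing import Dict, List, Any, Optional, Set, Tuple, Callable
--
-- def select_prioritized_files_for_class(
--     class_id: str,
--     files_by_class: Dict[str, List[str]],
--     current_counts: Dict[str, int],
--     target_count: int,
--     processed_files: Set[str],
--     class_data: Dict[str, Any]
-- ) -> List[str]:
--     """
--     Pilih file untuk augmentasi kelas berdasarkan prioritas.
--
--     Args:
--         class_id: ID kelas yang akan diprioritaskan
--         files_by_class: Dictionary file berdasarkan kelas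
--         current_counts: Dictionary jumlah instance per kelas saat ini
--         target_count: Target jumlah instance per kelas
--         processed_files: Set file yang sudah diproses
--         class_data: Data kelas (hasil prepare_balancing)
--
--     Returns:
--         List file yang akan diaugmentasi
--     """
--     # File yang memiliki kelas ini
--     class_candidates = files_by_class.get(class_id, [])
--
--     # Hitung kebutuhan berdasarkan target
--     current_need = max(0, target_count - current_counts.get(class_id, 0))
--     num_files_needed = min(len(class_candidates), current_need)
--
--     if num_files_needed <= 0: return []
--
--     # Filter file yang belum diproses
--     eligible_files = [f for f in class_candidates if f not in processed_files]
--     if not eligible_files: return []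
--
--     # Prioritaskan file berdasarkan kompleksitas kelas
--     file_metadata = class_data.get('files_metadata', {})
--
--     # Dapatkan kelas yang sudah terpenuhi target
--     fulfilled_classes = {cls for cls, count in current_counts.items() if count >= target_count}
--
--     # High priority: File dengan kelas yang diperlukan dan tidak memiliki kelas yang sudah terpenuhi
--     high_priority = [f for f in eligible_files
--                    if f in file_metadata
--                    and class_id in file_metadata[f].get('classes', set())
--                    and not any(cls in fulfilled_classes for cls in file_metadata[f].get('classes', set()))]
--
--     # Medium priority: File dengan kelas yang diperlukan tapi memiliki 1-2 kelas yang sudah terpenuhi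
--     medium_priority = [f for f in eligible_files
--                      if f in file_metadata
--                      and class_id in file_metadata[f].get('classes', set())
--                      and f not in high_priority
--                      and len([cls for cls in file_metadata[f].get('classes', set()) if cls in fulfilled_classes]) <= 2]
--
--     # Low priority: Sisanya
--     low_priority = [f for f in eligible_files if f not in high_priority and f not in medium_priority]
--
--     # Gabungkan berdasarkan prioritas dan batasi jumlah file
--     return (high_priority + medium_priority + low_priority)[:num_files_needed]
-- ===== SOURCE B (Python) =====
-- def select_prioritized_files_for_class(
--     class_id,
--     files_by_class,
--     current_counts,
--     target_count,
--     processed_files,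
--     class_data
-- ):
--     candidates = files_by_class.get(class_id, [])
--     need = min(len(candidates), max(0, target_count - current_counts.get(class_id, 0)))
--     if need <= 0:
--         return []
--     eligible = [f for f in candidates if f not in processed_files]
--     if not eligible:
--         return []
--     metadata = class_data.get('files_metadata', {})
--     fulfilled = {cls for cls, cnt in current_counts.items() if cnt >= target_count}
--
--     def rank(f):
--         meta = metadata.get(f)
--         if meta is None:
--             return 2
--         classes = meta.get('classes', set())
--         if class_id not in classes:
--             return 2
--         hits = len([cls for cls in classes if cls in fulfilled])
--         return 0 if hits == 0 else (1 if hits <= 2 else 2)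
--
--     return sorted(eligible, key=rank)[:need]
-- ===== Notes on version B (the rewrite author's own statement) =====
-- stated objective: simpler
-- what changed: Replaces A's three separate tier comprehensions (whose medium/low tiers re-scan the earlier tier lists with list-membership tests) by computing one priority rank 0/1/2 per file and returning a single stable sort of the eligible files by that rank.
import Mathlib
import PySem

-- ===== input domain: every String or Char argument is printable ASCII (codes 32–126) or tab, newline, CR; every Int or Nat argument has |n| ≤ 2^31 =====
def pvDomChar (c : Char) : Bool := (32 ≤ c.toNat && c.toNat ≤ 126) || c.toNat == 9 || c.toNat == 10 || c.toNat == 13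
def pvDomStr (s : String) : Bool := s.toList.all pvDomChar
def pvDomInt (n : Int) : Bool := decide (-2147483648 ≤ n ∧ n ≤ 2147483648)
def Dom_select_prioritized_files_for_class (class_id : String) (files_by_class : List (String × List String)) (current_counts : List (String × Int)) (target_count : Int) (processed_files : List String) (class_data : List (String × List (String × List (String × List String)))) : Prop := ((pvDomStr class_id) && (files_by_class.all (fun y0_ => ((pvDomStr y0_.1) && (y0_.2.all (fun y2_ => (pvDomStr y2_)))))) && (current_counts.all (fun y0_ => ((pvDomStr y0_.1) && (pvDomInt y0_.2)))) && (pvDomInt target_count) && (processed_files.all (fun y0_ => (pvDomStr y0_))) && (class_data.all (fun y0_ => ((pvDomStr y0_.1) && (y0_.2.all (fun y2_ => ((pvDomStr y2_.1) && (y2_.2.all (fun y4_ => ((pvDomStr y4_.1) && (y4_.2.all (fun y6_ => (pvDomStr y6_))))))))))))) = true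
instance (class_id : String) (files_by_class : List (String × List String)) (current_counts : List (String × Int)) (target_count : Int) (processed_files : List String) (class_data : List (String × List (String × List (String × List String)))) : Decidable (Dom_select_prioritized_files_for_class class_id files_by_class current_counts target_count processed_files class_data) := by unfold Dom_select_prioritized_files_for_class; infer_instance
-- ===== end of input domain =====

-- B replaces A's three tier-filter passes (with membership tests against the earlier tiers) by a
-- per-file priority rank 0/1/2 and a single stable sort by that key; objective: simpler.


-- ===== PORT A =====
def select_prioritized_files_for_class (class_id : String) (files_by_class : List (String × List String)) (current_counts : List (String × Int)) (target_count : Int) (processed_files : List String) (class_data : List (String × List (String × List (String × List String)))) : List String :=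
  let class_candidates := (PySem.Dict.ofList files_by_class).getD class_id []
  let current_need := max 0 (target_count - (PySem.Dict.ofList current_counts).getD class_id 0)
  let num_files_needed := min (class_candidates.length : Int) current_need
  if num_files_needed ≤ 0 then [] else
  let eligible_files := class_candidates.filter (fun f => !(processed_files.contains f))
  if eligible_files = [] then [] else
  let file_metadata := PySem.Dict.ofList ((PySem.Dict.ofList class_data).getD "files_metadata" [])
  let fulfilled_classes := PySem.Set.ofList ((((PySem.Dict.ofList current_counts).items).filter (fun p => decide (target_count ≤ p.2))).map (fun p => p.1))
  let high_priority := eligible_files.filter (fun f =>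
    file_metadata.contains f &&
    ((PySem.Dict.ofList (file_metadata.getD f [])).getD "classes" []).contains class_id &&
    !(((PySem.Dict.ofList (file_metadata.getD f [])).getD "classes" []).any (fun cls => PySem.Set.contains fulfilled_classes cls)))
  let medium_priority := eligible_files.filter (fun f =>
    file_metadata.contains f &&
    ((PySem.Dict.ofList (file_metadata.getD f [])).getD "classes" []).contains class_id &&
    !(high_priority.contains f) &&
    decide ((((PySem.Dict.ofList (file_metadata.getD f [])).getD "classes" []).filter (fun cls => PySem.Set.contains fulfilled_classes cls)).length ≤ 2))
  let low_priority := eligible_files.filter (fun f => !(high_priority.contains f) && !(medium_priority.contains f))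
  PySem.List.slice (high_priority ++ medium_priority ++ low_priority) none (some num_files_needed)

-- ===== PORT B =====
-- B's nested 'def rank(f)' (it closes over class_id, metadata, fulfilled)
def spfcRank (class_id : String) (metadata : PySem.Dict String (List (String × List String))) (fulfilled : PySem.Set String) (f : String) : Int :=
  match metadata.get? f with
  | none => 2
  | some m =>
    let classes := (PySem.Dict.ofList m).getD "classes" []
    if !(classes.contains class_id) then 2
    else
      let hits := (classes.filter (fun cls => PySem.Set.contains fulfilled cls)).length
      if hits = 0 then 0 else if hits ≤ 2 then 1 else 2

def select_prioritized_files_for_class_alt (class_id : String) (files_by_class : List (String × List String)) (current_counts : List (String × Int)) (target_count : Int) (processed_files : List String) (class_data : List (String × List (String × List (String × List String)))) : List String :=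
  let candidates := (PySem.Dict.ofList files_by_class).getD class_id []
  let need := min (candidates.length : Int) (max 0 (target_count - (PySem.Dict.ofList current_counts).getD class_id 0))
  if need ≤ 0 then [] else
  let eligible := candidates.filter (fun f => !(processed_files.contains f))
  if eligible = [] then [] else
  let metadata := PySem.Dict.ofList ((PySem.Dict.ofList class_data).getD "files_metadata" [])
  let fulfilled := PySem.Set.ofList ((((PySem.Dict.ofList current_counts).items).filter (fun p => decide (target_count ≤ p.2))).map (fun p => p.1))
  PySem.List.slice (PySem.List.sorted eligible (spfcRank class_id metadata fulfilled)) none (some need)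

-- ===== PRECONDITION & SPEC =====
def Spec_select_prioritized_files_for_class (class_id : String) (files_by_class : List (String × List String)) (current_counts : List (String × Int)) (target_count : Int) (processed_files : List String) (class_data : List (String × List (String × List (String × List String)))) (out : List String) : Prop := out = select_prioritized_files_for_class_alt class_id files_by_class current_counts target_count processed_files class_data
instance (class_id : String) (files_by_class : List (String × List String)) (current_counts : List (String × Int)) (target_count : Int) (processed_files : List String) (class_data : List (String × List (String × List (String × List String)))) (out : List String) : Decidable (Spec_select_prioritized_files_for_class class_id files_by_class current_counts target_count processed_files class_data out) := by unfold Spec_select_prioritized_files_for_class; infer_instance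

-- ===== CLAIM (what is proved, stated in full; the proofs are below) =====
def Claim_equal_select_prioritized_files_for_class : Prop := ∀ (class_id : String) (files_by_class : List (String × List String)) (current_counts : List (String × Int)) (target_count : Int) (processed_files : List String) (class_data : List (String × List (String × List (String × List String)))), Dom_select_prioritized_files_for_class class_id files_by_class current_counts target_count processed_files class_data → Spec_select_prioritized_files_for_class class_id files_by_class current_counts target_count processed_files class_data (select_prioritized_files_for_class class_id files_by_class current_counts target_count processed_files class_data)

-- ===== LEMMAS AND PROOFS =====

-- insertBy into a two-group list: skips the group it is not before, lands before the group it is before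
lemma insertBy_group {α : Type} (before : α → α → Bool) (x : α) (l1 l2 : List α)
    (h1 : ∀ y ∈ l1, before x y = false) (h2 : ∀ y ∈ l2, before x y = true) :
    PySem.List.insertBy before x (l1 ++ l2) = l1 ++ x :: l2 := by
  cases l2 with
  | nil => simpa using PySem.List.insertBy_of_forall_not_before before x l1 h1
  | cons y ys =>
    induction l1 with
    | nil => simp [PySem.List.insertBy, h2 y (by simp)]
    | cons a t ih =>
      simp only [List.cons_append, PySem.List.insertBy, h1 a (by simp)]
      simp only [Bool.false_eq_true, if_false, List.cons.injEq, true_and]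
      exact ih (fun y hy => h1 y (by simp [hy]))

-- stable sort by a 0/1/2-valued key is the three filters in key order, generalized over grouped acc
lemma foldl_insertBy_three {α : Type} (key : α → Int) :
    ∀ (xs a0 a1 a2 : List α),
    (∀ x ∈ xs, key x = 0 ∨ key x = 1 ∨ key x = 2) →
    (∀ y ∈ a0, key y = 0) → (∀ y ∈ a1, key y = 1) → (∀ y ∈ a2, key y = 2) →
    xs.foldl (fun acc x => PySem.List.insertBy (fun a b => decide (key a < key b)) x acc) (a0 ++ a1 ++ a2)
      = (a0 ++ xs.filter (fun x => key x == 0)) ++ (a1 ++ xs.filter (fun x => key x == 1)) ++ (a2 ++ xs.filter (fun x => key x == 2)) := by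
  intro xs
  induction xs with
  | nil => intro a0 a1 a2 _ _ _ _; simp
  | cons x xs ih =>
    intro a0 a1 a2 hr h0 h1 h2
    simp only [List.foldl_cons]
    rcases hr x (by simp) with hx | hx | hx
    · have : PySem.List.insertBy (fun a b => decide (key a < key b)) x (a0 ++ a1 ++ a2)
          = (a0 ++ [x]) ++ a1 ++ a2 := by
        rw [List.append_assoc]
        rw [insertBy_group _ x a0 (a1 ++ a2)
          (by intro y hy; simp [hx, h0 y hy])
          (by intro y hy; rcases List.mem_append.mp hy with h | h
              · simp [hx, h1 y h]
              · simp [hx, h2 y h])]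
        simp
      rw [this, ih (a0 ++ [x]) a1 a2 (fun z hz => hr z (by simp [hz]))
            (by intro y hy; rcases List.mem_append.mp hy with h | h
                · exact h0 y h
                · simp at h; simp [h, hx]) h1 h2]
      simp [hx, List.append_assoc]
    · have : PySem.List.insertBy (fun a b => decide (key a < key b)) x (a0 ++ a1 ++ a2)
          = a0 ++ (a1 ++ [x]) ++ a2 := by
        rw [insertBy_group _ x (a0 ++ a1) a2
          (by intro y hy; rcases List.mem_append.mp hy with h | h
              · simp [hx, h0 y h]
              · simp [hx, h1 y h])
          (by intro y hy; simp [hx, h2 y hy])]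
        simp
      rw [this, ih a0 (a1 ++ [x]) a2 (fun z hz => hr z (by simp [hz])) h0
            (by intro y hy; rcases List.mem_append.mp hy with h | h
                · exact h1 y h
                · simp at h; simp [h, hx]) h2]
      simp [hx, List.append_assoc]
    · have : PySem.List.insertBy (fun a b => decide (key a < key b)) x (a0 ++ a1 ++ a2)
          = a0 ++ a1 ++ (a2 ++ [x]) := by
        rw [PySem.List.insertBy_of_forall_not_before _ x (a0 ++ a1 ++ a2)
          (by intro y hy; rcases List.mem_append.mp hy with h | h
              · rcases List.mem_append.mp h with h' | h'
                · simp [hx, h0 y h']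
                · simp [hx, h1 y h']
              · simp [hx, h2 y h])]
        simp
      rw [this, ih a0 a1 (a2 ++ [x]) (fun z hz => hr z (by simp [hz])) h0 h1
            (by intro y hy; rcases List.mem_append.mp hy with h | h
                · exact h2 y h
                · simp at h; simp [h, hx])]
      simp [hx, List.append_assoc]

lemma sorted_three {α : Type} (key : α → Int) (xs : List α)
    (hr : ∀ x ∈ xs, key x = 0 ∨ key x = 1 ∨ key x = 2) :
    PySem.List.sorted xs key
      = xs.filter (fun x => key x == 0) ++ xs.filter (fun x => key x == 1) ++ xs.filter (fun x => key x == 2) := by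
  rw [PySem.List.sorted_eq_foldl_insertBy]
  simpa using foldl_insertBy_three key xs [] [] [] hr (by simp) (by simp) (by simp)

-- membership in a filtered list, as a Bool equation
lemma contains_filter (E : List String) (p : String → Bool) (f : String) :
    (E.filter p).contains f = (E.contains f && p f) := by
  by_cases h : f ∈ E.filter p
  · have := List.mem_filter.mp h
    simp [h, this.1, this.2]
  · by_cases hE : f ∈ E
    · have : p f = false := by
        cases hp : p f
        · rfl
        · exact absurd (List.mem_filter.mpr ⟨hE, hp⟩) h
      simp [h, hE, this]
    · simp [h, hE]

-- spfcRank's value cases, phrased against port A's three Bool predicates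
lemma spfcRank_eq_zero (class_id : String) (md : PySem.Dict String (List (String × List String))) (ful : PySem.Set String) (f : String) :
    (spfcRank class_id md ful f == 0)
      = (md.contains f &&
         ((PySem.Dict.ofList (md.getD f [])).getD "classes" []).contains class_id &&
         !(((PySem.Dict.ofList (md.getD f [])).getD "classes" []).any (fun cls => PySem.Set.contains ful cls))) := by
  unfold spfcRank
  rw [PySem.Dict.contains_eq_isSome_get?]
  cases hg : md.get? f with
  | none => simp
  | some m =>
    have hD : md.getD f [] = m := PySem.Dict.getD_of_get?_eq_some _ _ hg
    simp only []
    rw [hD]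
    generalize (PySem.Dict.ofList m).getD "classes" [] = C
    cases hco : C.contains class_id with
    | false =>
      rw [if_pos (by decide)]
      simp
    | true =>
      rw [if_neg (by simp)]
      by_cases hz : (C.filter (fun cls => PySem.Set.contains ful cls)).length = 0
      · rw [if_pos hz]
        have hany : (C.any fun cls => PySem.Set.contains ful cls) = false := by
          rw [List.length_eq_zero_iff, List.filter_eq_nil_iff] at hz
          rw [List.any_eq_false]
          intro a ha; simpa using hz a ha
        rw [hany]
        simp
      · rw [if_neg hz]
        have hany : (C.any fun cls => PySem.Set.contains ful cls) = true := by
          rw [List.any_eq_true]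
          rcases List.exists_mem_of_ne_nil _ (List.length_pos_iff.mp (Nat.pos_of_ne_zero hz)) with ⟨a, ha⟩
          have := List.mem_filter.mp ha
          exact ⟨a, this.1, this.2⟩
        rw [hany]
        by_cases h2 : (C.filter (fun cls => PySem.Set.contains ful cls)).length ≤ 2
        · rw [if_pos h2]; simp
        · rw [if_neg h2]; simp

lemma spfcRank_eq_one (class_id : String) (md : PySem.Dict String (List (String × List String))) (ful : PySem.Set String) (f : String) :
    (spfcRank class_id md ful f == 1)
      = (md.contains f &&
         ((PySem.Dict.ofList (md.getD f [])).getD "classes" []).contains class_id &&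
         !(spfcRank class_id md ful f == 0) &&
         decide ((((PySem.Dict.ofList (md.getD f [])).getD "classes" []).filter (fun cls => PySem.Set.contains ful cls)).length ≤ 2)) := by
  unfold spfcRank
  rw [PySem.Dict.contains_eq_isSome_get?]
  cases hg : md.get? f with
  | none => simp
  | some m =>
    have hD : md.getD f [] = m := PySem.Dict.getD_of_get?_eq_some _ _ hg
    simp only []
    rw [hD]
    generalize (PySem.Dict.ofList m).getD "classes" [] = C
    cases hco : C.contains class_id with
    | false =>
      rw [if_pos (by decide)]
      simp
    | true =>
      rw [if_neg (by simp)]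
      by_cases hz : (C.filter (fun cls => PySem.Set.contains ful cls)).length = 0
      · rw [if_pos hz]
        simp
      · rw [if_neg hz]
        by_cases h2 : (C.filter (fun cls => PySem.Set.contains ful cls)).length ≤ 2
        · rw [if_pos h2]
          have h2' : (C.filter (fun cls => decide (cls ∈ ful))).length ≤ 2 := by simpa using h2
          simp [h2']
        · rw [if_neg h2]
          have h2' : ¬ (C.filter (fun cls => decide (cls ∈ ful))).length ≤ 2 := by simpa using h2
          simp [h2']

-- the core equality: A's three concatenated tier filters = B's stable sort by rank
lemma core (class_id : String) (E : List String) (md : PySem.Dict String (List (String × List String))) (ful : PySem.Set String) :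
    (E.filter (fun f =>
        md.contains f &&
        ((PySem.Dict.ofList (md.getD f [])).getD "classes" []).contains class_id &&
        !(((PySem.Dict.ofList (md.getD f [])).getD "classes" []).any (fun cls => PySem.Set.contains ful cls))) ++
     E.filter (fun f =>
        md.contains f &&
        ((PySem.Dict.ofList (md.getD f [])).getD "classes" []).contains class_id &&
        !((E.filter (fun g =>
            md.contains g &&
            ((PySem.Dict.ofList (md.getD g [])).getD "classes" []).contains class_id &&
            !(((PySem.Dict.ofList (md.getD g [])).getD "classes" []).any (fun cls => PySem.Set.contains ful cls)))).contains f) &&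
        decide ((((PySem.Dict.ofList (md.getD f [])).getD "classes" []).filter (fun cls => PySem.Set.contains ful cls)).length ≤ 2)) ++
     E.filter (fun f =>
        !((E.filter (fun g =>
            md.contains g &&
            ((PySem.Dict.ofList (md.getD g [])).getD "classes" []).contains class_id &&
            !(((PySem.Dict.ofList (md.getD g [])).getD "classes" []).any (fun cls => PySem.Set.contains ful cls)))).contains f) &&
        !((E.filter (fun g =>
            md.contains g &&
            ((PySem.Dict.ofList (md.getD g [])).getD "classes" []).contains class_id &&
            !((E.filter (fun h =>
                md.contains h &&
                ((PySem.Dict.ofList (md.getD h [])).getD "classes" []).contains class_id &&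
                !(((PySem.Dict.ofList (md.getD h [])).getD "classes" []).any (fun cls => PySem.Set.contains ful cls)))).contains g) &&
            decide ((((PySem.Dict.ofList (md.getD g [])).getD "classes" []).filter (fun cls => PySem.Set.contains ful cls)).length ≤ 2))).contains f)))
    = PySem.List.sorted E (spfcRank class_id md ful) := by
  have hr : ∀ x ∈ E, spfcRank class_id md ful x = 0 ∨ spfcRank class_id md ful x = 1 ∨ spfcRank class_id md ful x = 2 := by
    intro x _
    unfold spfcRank
    cases md.get? x with
    | none => simp
    | some m =>
      simp only []
      split
      · simp
      · split
        · simp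
        · split <;> simp
  rw [sorted_three _ E hr]
  -- rewrite each of A's filters into a rank filter
  have e0 : E.filter (fun f =>
        md.contains f &&
        ((PySem.Dict.ofList (md.getD f [])).getD "classes" []).contains class_id &&
        !(((PySem.Dict.ofList (md.getD f [])).getD "classes" []).any (fun cls => PySem.Set.contains ful cls)))
      = E.filter (fun f => spfcRank class_id md ful f == 0) := by
    apply List.filter_congr
    intro f _
    rw [spfcRank_eq_zero]
  have e1 : E.filter (fun f =>
        md.contains f &&
        ((PySem.Dict.ofList (md.getD f [])).getD "classes" []).contains class_id &&
        !((E.filter (fun g =>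
            md.contains g &&
            ((PySem.Dict.ofList (md.getD g [])).getD "classes" []).contains class_id &&
            !(((PySem.Dict.ofList (md.getD g [])).getD "classes" []).any (fun cls => PySem.Set.contains ful cls)))).contains f) &&
        decide ((((PySem.Dict.ofList (md.getD f [])).getD "classes" []).filter (fun cls => PySem.Set.contains ful cls)).length ≤ 2))
      = E.filter (fun f => spfcRank class_id md ful f == 1) := by
    apply List.filter_congr
    intro f hf
    rw [e0, contains_filter]
    have : E.contains f = true := by simpa [List.contains_iff_mem] using hf
    rw [this, Bool.true_and, spfcRank_eq_one, spfcRank_eq_zero]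
  have e2 : E.filter (fun f =>
        !((E.filter (fun g =>
            md.contains g &&
            ((PySem.Dict.ofList (md.getD g [])).getD "classes" []).contains class_id &&
            !(((PySem.Dict.ofList (md.getD g [])).getD "classes" []).any (fun cls => PySem.Set.contains ful cls)))).contains f) &&
        !((E.filter (fun g =>
            md.contains g &&
            ((PySem.Dict.ofList (md.getD g [])).getD "classes" []).contains class_id &&
            !((E.filter (fun h =>
                md.contains h &&
                ((PySem.Dict.ofList (md.getD h [])).getD "classes" []).contains class_id &&
                !(((PySem.Dict.ofList (md.getD h [])).getD "classes" []).any (fun cls => PySem.Set.contains ful cls)))).contains g) &&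
            decide ((((PySem.Dict.ofList (md.getD g [])).getD "classes" []).filter (fun cls => PySem.Set.contains ful cls)).length ≤ 2))).contains f))
      = E.filter (fun f => spfcRank class_id md ful f == 2) := by
    apply List.filter_congr
    intro f hf
    rw [e1, e0, contains_filter, contains_filter]
    have hE : E.contains f = true := by simpa [List.contains_iff_mem] using hf
    rw [hE, Bool.true_and, Bool.true_and]
    rcases hr f hf with h | h | h <;> simp [h]
  rw [e2, e1, e0]

-- ===== VERDICT (by name: the statement is the Claim_ definition above) =====
theorem select_prioritized_files_for_class_spec : Claim_equal_select_prioritized_files_for_class := by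
  intro class_id files_by_class current_counts target_count processed_files class_data _
  unfold Spec_select_prioritized_files_for_class
  unfold select_prioritized_files_for_class select_prioritized_files_for_class_alt
  simp only []
  by_cases hn : min (((PySem.Dict.ofList files_by_class).getD class_id []).length : Int)
      (max 0 (target_count - (PySem.Dict.ofList current_counts).getD class_id 0)) ≤ 0
  · rw [if_pos hn, if_pos hn]
  · rw [if_neg hn, if_neg hn]
    by_cases he : ((PySem.Dict.ofList files_by_class).getD class_id []).filter
        (fun f => !(processed_files.contains f)) = []
    · rw [if_pos he, if_pos he]
    · rw [if_neg he, if_neg he]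
      rw [core]
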